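-- pv_equiv track=rewrite | github.com/Nosmoht/agentic-control | src/agentic_control/persistence/prefix.py | _minimal_unique_prefix_length
-- ===== SOURCE A (Python) =====
-- MIN_PREFIX_LEN = 4
--
-- def _minimal_unique_prefix_length(candidates: list[str]) -> int:
--     if len(candidates) <= 1:
--         return MIN_PREFIX_LEN
--     for length in range(MIN_PREFIX_LEN, 37):
--         prefixes = {c[:length] for c in candidates}
--         if len(prefixes) == len(candidates):
--             return length
--     return 36
-- ===== SOURCE B (Python) =====
-- MIN_PREFIX_LEN = 4
--
--
-- def _lcp(x, y):
--     k = 0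
--     while k < len(x) and k < len(y) and x[k] == y[k]:
--         k += 1
--     return k
--
--
-- def _minimal_unique_prefix_length(candidates: list[str]) -> int:
--     if len(candidates) <= 1:
--         return MIN_PREFIX_LEN
--     m = 0
--     for i, x in enumerate(candidates):
--         for y in candidates[i + 1:]:
--             if x == y:
--                 return 36
--             m = max(m, _lcp(x, y))
--     return min(max(m + 1, MIN_PREFIX_LEN), 36)
-- ===== Notes on version B (the rewrite author's own statement) =====
-- stated objective: alternative
-- what changed: Replaced the try-every-length loop that builds a prefix set per candidate length with a single pairwise scan computing longest-common-prefix lengths (early 36 on a duplicate pair) and a closed-form min/max clamp of the maximal LCP.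
import Mathlib
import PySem

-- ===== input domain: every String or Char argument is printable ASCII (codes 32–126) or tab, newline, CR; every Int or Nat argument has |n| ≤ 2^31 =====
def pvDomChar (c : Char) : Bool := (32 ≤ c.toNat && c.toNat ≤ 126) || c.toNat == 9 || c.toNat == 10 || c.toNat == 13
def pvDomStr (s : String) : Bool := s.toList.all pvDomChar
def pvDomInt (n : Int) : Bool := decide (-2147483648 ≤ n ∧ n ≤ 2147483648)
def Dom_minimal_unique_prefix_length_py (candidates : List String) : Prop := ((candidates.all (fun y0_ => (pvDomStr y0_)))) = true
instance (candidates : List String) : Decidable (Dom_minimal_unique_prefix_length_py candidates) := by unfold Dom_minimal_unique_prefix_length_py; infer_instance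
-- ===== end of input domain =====

-- Equivalent re-implementation: A tries every prefix length 4..36 building a set of prefixes per
-- length; B makes one pairwise scan computing longest-common-prefix lengths (returning 36 on a
-- duplicate pair) and clamps max-LCP+1 into [4,36]. Alternative algorithm, similar cost.


-- ===== PORT A =====
-- prefixes = {c[:length] for c in candidates}
def pvAPrefixes (candidates : List String) (length : Int) : PySem.Set String :=
  PySem.Set.ofList (candidates.map (fun c => PySem.Str.slice c none (some length)))

-- for length in range(4, 37): … return length / fall through to 36
def pvALoop (candidates : List String) : List Int → Int
  | [] => 36
  | length :: rest =>
      if PySem.Set.len (pvAPrefixes candidates length) = (candidates.length : Int) then length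
      else pvALoop candidates rest

def minimal_unique_prefix_length_py (candidates : List String) : Int :=
  if (candidates.length : Int) ≤ 1 then 4
  else pvALoop candidates (PySem.List.pyRange 4 37 1)

-- ===== PORT B =====
-- _lcp(x, y): k = 0; while k < len(x) and k < len(y) and x[k] == y[k]: k += 1; return k
def pvLcp : List Char → List Char → Nat
  | a :: x, b :: y => if a = b then pvLcp x y + 1 else 0
  | _, _ => 0

-- inner loop: for y in candidates[i+1:]: if x == y: return 36 (none); m = max(m, _lcp(x, y))
def pvBInner (x : List Char) : Nat → List (List Char) → Option Nat
  | m, [] => some m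
  | m, y :: ys => if x = y then none else pvBInner x (max m (pvLcp x y)) ys

-- outer loop over i (x = candidates[i], remaining tail = candidates[i+1:])
def pvBOuter : Nat → List (List Char) → Option Nat
  | m, [] => some m
  | m, x :: rest =>
      match pvBInner x m rest with
      | none => none
      | some m' => pvBOuter m' rest

def minimal_unique_prefix_length_py_alt (candidates : List String) : Int :=
  if candidates.length ≤ 1 then 4
  else
    match pvBOuter 0 (candidates.map String.toList) with
    | none => 36
    | some m => min (max ((m : Int) + 1) 4) 36

-- ===== PRECONDITION & SPEC =====
def Spec_minimal_unique_prefix_length_py (candidates : List String) (out : Int) : Prop := out = minimal_unique_prefix_length_py_alt candidates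
instance (candidates : List String) (out : Int) : Decidable (Spec_minimal_unique_prefix_length_py candidates out) := by unfold Spec_minimal_unique_prefix_length_py; infer_instance

-- ===== CLAIM (what is proved, stated in full; the proofs are below) =====
def Claim_equal_minimal_unique_prefix_length_py : Prop := ∀ (candidates : List String), Dom_minimal_unique_prefix_length_py candidates → Spec_minimal_unique_prefix_length_py candidates (minimal_unique_prefix_length_py candidates)

-- ===== LEMMAS AND PROOFS =====

-- max of pvLcp x y over y ∈ r
def pvInnerMax (x : List Char) (r : List (List Char)) : Nat :=
  r.foldr (fun y a => max (pvLcp x y) a) 0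

-- max of pvLcp over all ordered pairs
def pvPairMax : List (List Char) → Nat
  | [] => 0
  | x :: r => max (pvInnerMax x r) (pvPairMax r)

theorem pvLcp_take_eq_iff (x y : List Char) (h : x ≠ y) (L : Nat) :
    x.take L = y.take L ↔ L ≤ pvLcp x y := by
  induction x generalizing y L with
  | nil =>
    cases y with
    | nil => exact absurd rfl h
    | cons b ys =>
      cases L with
      | zero => simp [pvLcp]
      | succ L' => simp [pvLcp]
  | cons a xs ih =>
    cases y with
    | nil =>
      cases L with
      | zero => simp [pvLcp]
      | succ L' => simp [pvLcp]
    | cons b ys =>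
      by_cases hab : a = b
      · subst hab
        have hxy : xs ≠ ys := fun hh => h (by rw [hh])
        cases L with
        | zero => simp [pvLcp]
        | succ L' =>
          simp [pvLcp, List.take_succ_cons, ih ys hxy L']
      · cases L with
        | zero => simp [pvLcp, hab]
        | succ L' => simp [pvLcp, List.take_succ_cons, hab]

theorem pvBInner_eq (x : List Char) (m : Nat) (r : List (List Char)) :
    pvBInner x m r = if ∀ y ∈ r, x ≠ y then some (max m (pvInnerMax x r)) else none := by
  induction r generalizing m with
  | nil => simp [pvBInner, pvInnerMax]
  | cons y ys ih =>
    by_cases hxy : x = y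
    · simp [pvBInner, hxy]
    · simp only [pvBInner, hxy, ih, pvInnerMax, List.foldr_cons, List.mem_cons]
      by_cases hall : ∀ z ∈ ys, x ≠ z
      · simp [hxy, Nat.max_assoc]
      · simp [hall, hxy]

theorem pvBOuter_eq (ls : List (List Char)) (m : Nat) :
    pvBOuter m ls = if ls.Pairwise (· ≠ ·) then some (max m (pvPairMax ls)) else none := by
  induction ls generalizing m with
  | nil => simp [pvBOuter, pvPairMax]
  | cons x r ih =>
    rw [pvBOuter, pvBInner_eq]
    by_cases hall : ∀ y ∈ r, x ≠ y
    · rw [if_pos hall]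
      by_cases hp : r.Pairwise (· ≠ ·)
      · simp [ih, hp, pvPairMax, List.pairwise_cons, Nat.max_assoc]
        exact fun hx => hall x hx rfl
      · simp [ih, hp, List.pairwise_cons]
    · rw [if_neg hall]
      simp [hall, List.pairwise_cons]

theorem pvInnerMax_lt_iff (x : List Char) (r : List (List Char)) (n : Nat) (hn : 0 < n) :
    pvInnerMax x r < n ↔ ∀ y ∈ r, pvLcp x y < n := by
  induction r with
  | nil => simpa [pvInnerMax]
  | cons y ys ih =>
    simp only [pvInnerMax, List.foldr_cons] at ih ⊢
    simp only [List.mem_cons, forall_eq_or_imp]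
    rw [← ih]
    omega

theorem pvPairMax_lt_iff (ls : List (List Char)) (n : Nat) (hn : 0 < n) :
    pvPairMax ls < n ↔ ls.Pairwise (fun x y => pvLcp x y < n) := by
  induction ls with
  | nil => simpa [pvPairMax]
  | cons x r ih =>
    rw [List.pairwise_cons, ← ih, ← pvInnerMax_lt_iff x r n hn, pvPairMax]
    omega

-- set(prefix list) has full size iff the prefix list has no duplicates
theorem pvOfListLen_iff (l : List String) :
    (PySem.Set.ofList l).length = l.length ↔ l.Nodup := by
  constructor
  · intro h
    have h1 : (PySem.Set.ofList l).toFinset = l.toFinset := by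
      ext x; simp [PySem.Set.mem_ofList]
    have h2 := List.toFinset_card_of_nodup (PySem.Set.nodup_ofList l)
    have h3 : l.dedup.length = l.length := by
      rw [← List.card_toFinset, ← h1, h2, h]
    have h4 := (List.dedup_sublist l).eq_of_length h3
    rw [← h4]; exact List.nodup_dedup l
  · intro h; rw [PySem.Set.ofList_eq_self_of_nodup l h]

-- A's per-length condition, characterised
theorem pvCond_iff (cs : List String) (L : Int) (h4 : 4 ≤ L) :
    PySem.Set.len (pvAPrefixes cs L) = (cs.length : Int) ↔
      ((cs.map String.toList).Pairwise (· ≠ ·) ∧ pvPairMax (cs.map String.toList) < L.toNat) := by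
  have hslice : ∀ c : String, (PySem.Str.slice c none (some L)).toList = c.toList.take L.toNat := by
    intro c; simp [PySem.Str.slice, PySem.List.slice_to _ (by omega : (0:Int) ≤ L)]
  have hlen : PySem.Set.len (pvAPrefixes cs L) = (cs.length : Int) ↔
      (cs.map (fun c => PySem.Str.slice c none (some L))).Nodup := by
    rw [show PySem.Set.len (pvAPrefixes cs L) =
        (((PySem.Set.ofList (cs.map (fun c => PySem.Str.slice c none (some L)))).length : Nat) : Int) from rfl]
    rw [show (cs.length : Int) = (((cs.map (fun c => PySem.Str.slice c none (some L))).length : Nat) : Int) by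
      rw [List.length_map]]
    rw [Int.natCast_inj]
    exact pvOfListLen_iff _
  rw [hlen]
  rw [← List.nodup_map_iff (f := String.toList) (fun a b hh => String.toList_inj.mp hh)]
  rw [List.map_map]
  have hfun : (String.toList ∘ fun c => PySem.Str.slice c none (some L)) =
      (fun n : List Char => n.take L.toNat) ∘ String.toList := by
    funext c; simp [hslice c]
  rw [hfun, ← List.map_map]
  rw [List.Nodup, List.pairwise_map]
  rw [List.Pairwise.iff (S := fun x y : List Char => x ≠ y ∧ pvLcp x y < L.toNat)
    (fun a b => by
      by_cases hab : a = b
      · subst hab; simp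
      · simp only [ne_eq, hab, not_false_eq_true, true_and]
        rw [← Nat.not_le, ← pvLcp_take_eq_iff a b hab])]
  rw [List.pairwise_and_iff]
  rw [pvPairMax_lt_iff _ _ (by omega)]

theorem pvALoop_all_false (cs : List String) (l1 l2 : List Int)
    (h : ∀ L ∈ l1, ¬ PySem.Set.len (pvAPrefixes cs L) = (cs.length : Int)) :
    pvALoop cs (l1 ++ l2) = pvALoop cs l2 := by
  induction l1 with
  | nil => simp
  | cons L l1' ih =>
    rw [List.cons_append, pvALoop, if_neg (h L (List.mem_cons_self))]
    exact ih (fun L' hL' => h L' (List.mem_cons_of_mem _ hL'))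

-- ===== VERDICT (by name: the statement is the Claim_ definition above) =====
theorem minimal_unique_prefix_length_py_spec : Claim_equal_minimal_unique_prefix_length_py := by
  intro candidates _dom
  unfold Spec_minimal_unique_prefix_length_py minimal_unique_prefix_length_py minimal_unique_prefix_length_py_alt
  by_cases hn : candidates.length ≤ 1
  · simp [hn, show ((candidates.length : Int) ≤ 1) from by exact_mod_cast hn]
  · rw [if_neg (by exact_mod_cast hn), if_neg hn]
    rw [pvBOuter_eq]
    by_cases hD : (candidates.map String.toList).Pairwise (· ≠ ·)
    · rw [if_pos hD, Nat.zero_max]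
      change _ = min (max ((pvPairMax (List.map String.toList candidates) : Int) + 1) 4) 36
      by_cases hM36 : 36 ≤ pvPairMax (candidates.map String.toList)
      · have hfalse : ∀ L ∈ PySem.List.pyRange 4 37 1,
            ¬ PySem.Set.len (pvAPrefixes candidates L) = (candidates.length : Int) := by
          intro L hL
          rw [PySem.List.mem_pyRange_one] at hL
          rw [pvCond_iff candidates L (by omega)]
          rintro ⟨-, hlt⟩
          omega
        have h1 := pvALoop_all_false candidates (PySem.List.pyRange 4 37 1) [] hfalse
        rw [List.append_nil] at h1
        rw [h1, pvALoop]
        omega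
      · have h4 : 4 ≤ max ((pvPairMax (candidates.map String.toList) : Int) + 1) 4 := by omega
        have h36 : max ((pvPairMax (candidates.map String.toList) : Int) + 1) 4 ≤ 36 := by
          have : (pvPairMax (candidates.map String.toList) : Int) ≤ 35 := by
            exact_mod_cast Nat.le_of_lt_succ (by omega)
          omega
        rw [PySem.List.pyRange_one_append 4 (max ((pvPairMax (candidates.map String.toList) : Int) + 1) 4) 37
          (by omega) (by omega)]
        rw [pvALoop_all_false candidates _ _ (by
          intro L hL
          rw [PySem.List.mem_pyRange_one] at hL
          rw [pvCond_iff candidates L (by omega)]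
          rintro ⟨-, hlt⟩
          omega)]
        rw [PySem.List.pyRange_one_cons (by omega), pvALoop,
          if_pos ((pvCond_iff candidates _ h4).mpr ⟨hD, by omega⟩)]
        omega
    · rw [if_neg hD]
      have hfalse : ∀ L ∈ PySem.List.pyRange 4 37 1,
          ¬ PySem.Set.len (pvAPrefixes candidates L) = (candidates.length : Int) := by
        intro L hL
        rw [PySem.List.mem_pyRange_one] at hL
        rw [pvCond_iff candidates L (by omega)]
        rintro ⟨hD2, -⟩
        exact hD hD2
      have h1 := pvALoop_all_false candidates (PySem.List.pyRange 4 37 1) [] hfalse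
      rw [List.append_nil] at h1
      rw [h1, pvALoop]
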